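-- pv_equiv track=rewrite | github.com/urhprimozic/programiranje-1 | izpiti/2020-01-28/nal3.py | kapitalizem
-- ===== SOURCE A (Python) =====
-- from functools import lru_cache
--
-- def kapitalizem(n, sirine):
--         m = len(sirine)
--
--         @lru_cache(maxsize=None)
--         def f(n, i):
--             if i >= m:
--                 return 1
--
--             l = sirine[i]
--
--             if n < l:
--                 return 0
--             stevilo = 0
--             for zacetek in range(0, n - l+1):
--                 stevilo += f(n -1 -zacetek - l, i+1)
--             return stevilo
--         return f(n,0)
-- ===== SOURCE B (Python) =====
-- def kapitalizem(n, sirine):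
--     m = len(sirine)
--     # maximal budget ever queried at each level i
--     Ns = []
--     N = n
--     for l in sirine:
--         Ns.append(N)
--         N = N - 1 - l
--     # levels at and below the first "dead" level (budget cap under its width)
--     # are never queried with a budget >= their width, so tabulation stops there
--     mm = m
--     for i in range(m):
--         if Ns[i] < sirine[i]:
--             mm = i + 1
--             break
--     # build levels bottom-up; each level i is (l_i, arr) with
--     # arr[j] = f(l_i + j, i) for j = 0 .. Ns[i] - l_i, computed as a running
--     # prefix sum of level i+1 (dropping the inner summation loop of A)
--     prev = None  # None = base level (constant 1)
--     for i in range(mm - 1, -1, -1):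
--         l = sirine[i]
--         arr = []
--         acc = 0
--         for k in range(l, Ns[i] + 1):
--             s = k - 1 - l
--             if prev is None:
--                 v = 1
--             else:
--                 pl, parr = prev
--                 v = 0 if s < pl else parr[s - pl]
--             acc += v
--             arr.append(acc)
--         prev = (l, arr)
--     if prev is None:
--         return 1
--     l0, arr0 = prev
--     return 0 if n < l0 else arr0[n - l0]
-- ===== Notes on version B (the rewrite author's own statement) =====
-- stated objective: alternative
-- what changed: Replaces the memoized top-down recursion whose inner loop re-sums all start positions by a bottom-up tabulation that builds, for each suffix of widths, an array of running prefix sums of the next level (and stops below the first level whose budget cap is under its width).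
import Mathlib
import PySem

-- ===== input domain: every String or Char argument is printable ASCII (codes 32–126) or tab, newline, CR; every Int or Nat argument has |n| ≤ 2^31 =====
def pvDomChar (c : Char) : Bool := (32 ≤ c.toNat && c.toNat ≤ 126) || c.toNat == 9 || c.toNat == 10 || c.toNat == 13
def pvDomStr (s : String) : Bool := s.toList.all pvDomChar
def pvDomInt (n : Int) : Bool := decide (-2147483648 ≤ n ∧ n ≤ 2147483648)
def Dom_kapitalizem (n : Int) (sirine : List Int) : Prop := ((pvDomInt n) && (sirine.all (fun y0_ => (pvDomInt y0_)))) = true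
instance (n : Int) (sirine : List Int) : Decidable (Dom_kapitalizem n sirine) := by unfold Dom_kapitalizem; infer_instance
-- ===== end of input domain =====

-- B replaces A's memoized recursion (inner loop summing over all starts) by a
-- bottom-up tabulation of running prefix-sum arrays, one per width level.

-- ===== PORT A =====
-- A's f(n, i) recurses on the index i into sirine; we port it as structural
-- recursion on the suffix of sirine (the list drop at i), which is the same
-- recursion; the inner 'for zacetek in range(0, n-l+1)' is the foldl.
def kapA : List Int → Int → Int
  | [], _ => 1
  | l :: rest, n =>
      if n < l then 0
      else (PySem.List.pyRange 0 (n - l + 1) 1).foldl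
             (fun stevilo zacetek => stevilo + kapA rest (n - 1 - zacetek - l)) 0

def kapitalizem (n : Int) (sirine : List Int) : Int := kapA sirine n

-- ===== PORT B =====
-- lookup in a finished level: None (base) = 1; below l = 0; else arr[s - l]
def bLookup (prev : Option (Int × List Int)) (s : Int) : Int :=
  match prev with
  | none => 1
  | some (pl, parr) => if s < pl then 0 else PySem.List.pyGetD parr (s - pl) 0

-- the 'for k in range(l, Ns[i]+1)' loop: running prefix sum appended to arr
def bBuild (l N : Int) (prev : Option (Int × List Int)) : List Int :=
  ((PySem.List.pyRange l (N + 1) 1).foldl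
      (fun (p : List Int × Int) k =>
        let acc := p.2 + bLookup prev (k - 1 - l)
        (p.1 ++ [acc], acc))
      ([], 0)).1

-- Ns: the maximal budget queried at each level (built forward in Source B)
def bNs (n : Int) (sirine : List Int) : List Int :=
  match sirine with
  | [] => []
  | l :: rest => n :: bNs (n - 1 - l) rest

-- the cutoff: levels at and below the first dead level (N < l) stop the build
def bTrunc : List (Int × Int) → List (Int × Int)
  | [] => []
  | (l, N) :: rest => if N < l then [(l, N)] else (l, N) :: bTrunc rest

-- the 'for i in range(mm-1, -1, -1)' loop building prev level by level
def bLevels (pairs : List (Int × Int)) : Option (Int × List Int) :=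
  match pairs with
  | [] => none
  | (l, N) :: rest => some (l, bBuild l N (bLevels rest))

def kapitalizem_alt (n : Int) (sirine : List Int) : Int :=
  match bLevels (bTrunc (sirine.zip (bNs n sirine))) with
  | none => 1
  | some (l0, arr0) => if n < l0 then 0 else PySem.List.pyGetD arr0 (n - l0) 0

-- ===== PRECONDITION & SPEC =====
def Spec_kapitalizem (n : Int) (sirine : List Int) (out : Int) : Prop := out = kapitalizem_alt n sirine
instance (n : Int) (sirine : List Int) (out : Int) : Decidable (Spec_kapitalizem n sirine out) := by unfold Spec_kapitalizem; infer_instance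

-- ===== CLAIM (what is proved, stated in full; the proofs are below) =====
def Claim_equal_kapitalizem : Prop := ∀ (n : Int) (sirine : List Int), Dom_kapitalizem n sirine → Spec_kapitalizem n sirine (kapitalizem n sirine)

-- ===== LEMMAS AND PROOFS =====

-- Σ_{s = -1}^{t-1} kapA rest s   (the prefix sums B tabulates)
def sumTo (rest : List Int) (t : Int) : Int :=
  ((PySem.List.pyRange (-1) t 1).map (kapA rest)).sum

-- peeling the first summand off A's inner loop gives a two-term recurrence
lemma sumA (l : Int) (rest : List Int) (n : Int) (h : l ≤ n) :
    kapA (l :: rest) n = kapA rest (n - 1 - l) + kapA (l :: rest) (n - 1) := by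
  conv_lhs => simp only [kapA, if_neg (show ¬ n < l by omega)]
  rw [PySem.List.pyRange_one_cons (show (0:Int) < n - l + 1 by omega)]
  simp only [List.foldl_cons]
  rw [PySem.List.foldl_add, show (0:Int) + 1 = 1 by norm_num]
  by_cases hlt : l < n
  · -- n - 1 still admits the loop
    conv_rhs => simp only [kapA, if_neg (show ¬ n - 1 < l by omega)]
    rw [PySem.List.foldl_add]
    rw [PySem.List.pyRange_one 1 (n - l + 1), PySem.List.pyRange_one 0 (n - 1 - l + 1)]
    simp only [List.map_map, zero_add]
    have hcnt : (n - l + 1 - 1).toNat = (n - 1 - l + 1 - 0).toNat := by omega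
    have harg : n - 1 - 0 - l = n - 1 - l := by ring
    rw [harg, hcnt]
    congr 1
    refine congrArg List.sum (List.map_congr_left (fun k _ => ?_))
    simp only [Function.comp_apply]
    congr 1
    ring
  · -- n = l : the remaining loop is empty and kapA (l::rest) (n-1) = 0
    have hnl : n = l := by omega
    rw [PySem.List.pyRange_one_eq_nil (show n - l + 1 ≤ 1 by omega)]
    simp only [List.map_nil, List.sum_nil, add_zero, zero_add]
    have hz : kapA (l :: rest) (n - 1) = 0 := by
      simp only [kapA, if_pos (show n - 1 < l by omega)]
    rw [hz, add_zero]
    congr 1; ring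

-- A's loop value is the prefix sum of the next level
lemma kapA_cons_eq_sumTo (l : Int) (rest : List Int) :
    ∀ (k : Nat) (n : Int), n - l = (k : Int) →
      kapA (l :: rest) n = sumTo rest (n - l) := by
  intro k
  induction k with
  | zero =>
      intro n hn
      simp only [kapA, if_neg (show ¬ n < l by omega), sumTo]
      rw [show n - l + 1 = (1:Int) by omega, show n - l = (0:Int) by omega]
      rw [PySem.List.pyRange_one_cons (show (0:Int) < 1 by norm_num),
          show (0:Int) + 1 = 1 by norm_num,
          PySem.List.pyRange_one_eq_nil (le_refl (1:Int)),
          PySem.List.pyRange_one_cons (show (-1:Int) < 0 by norm_num),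
          show (-1:Int) + 1 = 0 by norm_num,
          PySem.List.pyRange_one_eq_nil (le_refl (0:Int))]
      simp only [List.foldl_cons, List.foldl_nil, List.map_cons, List.map_nil,
        List.sum_cons, List.sum_nil, zero_add, add_zero]
      congr 1; omega
  | succ k ih =>
      intro n hn
      have h1 : l ≤ n := by omega
      rw [sumA l rest n h1, ih (n - 1) (by omega)]
      unfold sumTo
      rw [show n - l = (n - l - 1) + 1 by ring,
          PySem.List.pyRange_one_succ_right (show (-1:Int) ≤ n - l - 1 by omega)]
      rw [List.map_append, List.sum_append]
      simp only [List.map_cons, List.map_nil, List.sum_cons, List.sum_nil, add_zero]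
      rw [show n - l - 1 = n - 1 - l by ring]
      exact add_comm _ _

lemma bBuild_aux (l : Int) (prev : Option (Int × List Int)) :
    ∀ (k : Nat) (M : Int), M = l + (k : Int) →
      (PySem.List.pyRange l M 1).foldl
          (fun (p : List Int × Int) x =>
            let acc := p.2 + bLookup prev (x - 1 - l)
            (p.1 ++ [acc], acc))
          ([], 0)
      = ((PySem.List.pyRange 0 (M - l) 1).map
            (fun j => ((PySem.List.pyRange (-1) j 1).map (bLookup prev)).sum),
         ((PySem.List.pyRange (-1) (M - l - 1) 1).map (bLookup prev)).sum) := by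
  intro k
  induction k with
  | zero =>
      intro M hM
      rw [PySem.List.pyRange_one_eq_nil (show M ≤ l by omega),
          PySem.List.pyRange_one_eq_nil (show M - l ≤ 0 by omega),
          PySem.List.pyRange_one_eq_nil (show M - l - 1 ≤ -1 by omega)]
      simp
  | succ k ih =>
      intro M hM
      rw [show M = (l + (k : Int)) + 1 by push_cast [hM]; ring,
          PySem.List.pyRange_one_succ_right (show l ≤ l + (k : Int) by omega),
          List.foldl_append, ih (l + (k : Int)) rfl]
      simp only [List.foldl_cons, List.foldl_nil]
      have e1 : l + (k : Int) - 1 - l = (k : Int) - 1 := by ring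
      have e2 : l + (k : Int) + 1 - l = (k : Int) + 1 := by ring
      have e3 : l + (k : Int) - l = (k : Int) := by ring
      have e4 : (k : Int) + 1 - 1 = (k : Int) := by ring
      simp only [e1, e2, e3, e4]
      have hsum : ((PySem.List.pyRange (-1) ((k : Int)) 1).map (bLookup prev)).sum
          = ((PySem.List.pyRange (-1) ((k : Int) - 1) 1).map (bLookup prev)).sum
            + bLookup prev ((k : Int) - 1) := by
        conv_lhs => rw [show (k : Int) = ((k : Int) - 1) + 1 by ring]
        rw [PySem.List.pyRange_one_succ_right (show (-1:Int) ≤ (k : Int) - 1 by omega),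
            List.map_append, List.sum_append]
        simp
      rw [PySem.List.pyRange_one_succ_right (show (0:Int) ≤ (k : Int) by omega),
          List.map_append, hsum]
      simp only [List.map_cons, List.map_nil, Prod.mk.injEq]
      constructor
      · rw [hsum]
      · trivial

lemma bBuild_eq (l N : Int) (prev : Option (Int × List Int)) :
    bBuild l N prev
      = (PySem.List.pyRange 0 (N + 1 - l) 1).map
          (fun j => ((PySem.List.pyRange (-1) j 1).map (bLookup prev)).sum) := by
  by_cases h : l ≤ N + 1
  · unfold bBuild
    rw [bBuild_aux l prev (N + 1 - l).toNat (N + 1) (by omega)]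
  · unfold bBuild
    rw [PySem.List.pyRange_one_eq_nil (show N + 1 ≤ l by omega),
        PySem.List.pyRange_one_eq_nil (show N + 1 - l ≤ 0 by omega)]
    simp

-- main invariant: a finished stack of levels looks up exactly kapA, for
-- budgets not above the level's maximal budget
lemma lookup_correct (sirine : List Int) :
    ∀ (n s : Int), s ≤ n →
      bLookup (bLevels (bTrunc (sirine.zip (bNs n sirine)))) s = kapA sirine s := by
  induction sirine with
  | nil => intro n s _; simp [bNs, bTrunc, bLevels, bLookup, kapA]
  | cons l rest ih =>
      intro n s hs
      simp only [bNs, List.zip_cons_cons, bTrunc]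
      by_cases hdead : n < l
      · -- dead level: its array is empty and every admissible budget is below l
        rw [if_pos hdead]
        simp only [bLevels, bBuild,
          PySem.List.pyRange_one_eq_nil (show n + 1 ≤ l by omega), List.foldl_nil]
        simp only [bLookup, kapA, if_pos (show s < l by omega)]
      · rw [if_neg hdead]
        simp only [bLevels]
        by_cases hsl : s < l
        · simp only [bLookup, kapA, if_pos hsl]
        · simp only [bLookup, if_neg hsl]
          rw [bBuild_eq,
              PySem.List.pyGetD_map_pyRange_of_nonneg _ (n + 1 - l) (s - l) 0
                (by omega) (by omega),
              kapA_cons_eq_sumTo l rest (s - l).toNat s (by omega)]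
          unfold sumTo
          congr 1
          refine List.map_congr_left (fun t ht => ?_)
          have h2 := PySem.List.mem_pyRange_one.mp ht
          exact ih (n - 1 - l) t (by omega)

lemma main_eq (n : Int) (sirine : List Int) :
    kapitalizem n sirine = kapitalizem_alt n sirine := by
  have h := lookup_correct sirine n n le_rfl
  unfold kapitalizem
  rw [← h]
  cases hb : bLevels (bTrunc (sirine.zip (bNs n sirine))) with
  | none => simp [kapitalizem_alt, hb, bLookup]
  | some p => rcases p with ⟨l0, arr⟩; simp [kapitalizem_alt, hb, bLookup]

-- ===== VERDICT (by name: the statement is the Claim_ definition above) =====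
theorem kapitalizem_spec : Claim_equal_kapitalizem := by
  intro n sirine _
  unfold Spec_kapitalizem
  exact main_eq n sirine
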